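-- pv_equiv track=rewrite | github.com/iwat/avent-of-code | 2024/day22/part2.py | solve
-- ===== SOURCE A (Python) =====
-- def solve(secret, rounds):
--     price_map = {}
--     deltas = []
--     prev_price = secret % 10
--     for r in range(rounds):
--         v1 = secret * 64
--         secret ^= v1
--         secret %= 16777216
--
--         v2 = secret // 32
--         secret ^= v2
--         secret %= 16777216
--
--         v3 = secret * 2048
--         secret ^= v3
--         secret %= 16777216
--
--         price = (secret % 10)
--         delta = price - prev_price
--         prev_price = price
--         deltas.append(delta)
--         if len(deltas) >= 4:
--             key = tuple(deltas[-4:])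
--             if key not in price_map:
--                 price_map[key] = price
--
--     return price_map
-- ===== SOURCE B (Python) =====
-- def solve(secret, rounds):
--     # sort-based: collect every 4-delta window as (key, index, end price),
--     # sort lexicographically so equal keys become adjacent with the smallest
--     # index first, keep the first entry of each key block, then restore
--     # chronological order and build the dict.
--     prices = [secret % 10]
--     s = secret
--     for _ in range(rounds):
--         s = (s ^ (s * 64)) % 16777216
--         s = (s ^ (s // 32)) % 16777216
--         s = (s ^ (s * 2048)) % 16777216
--         prices.append(s % 10)
--     deltas = [b - a for a, b in zip(prices, prices[1:])]
--     entries = [(tuple(deltas[i:i + 4]), i, p) for i, p in enumerate(prices[4:])]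
--     entries.sort(key=lambda e: (e[0], e[1]))
--     firsts = []
--     for e in entries:
--         if not firsts or firsts[-1][0] != e[0]:
--             firsts.append(e)
--     firsts.sort(key=lambda e: e[1])
--     return {key: price for key, _, price in firsts}
-- ===== Notes on version B (the rewrite author's own statement) =====
-- stated objective: alternative
-- what changed: A streams the PRNG and records each first-seen 4-delta window in a hash map as it goes; B instead materialises every window as a (key, index, price) entry, sorts the entries lexicographically, keeps the first entry of each equal-key block (the minimal index), re-sorts the survivors by index and builds the dict from them - sort-and-scan instead of a first-seen hash map.
import Mathlib
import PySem

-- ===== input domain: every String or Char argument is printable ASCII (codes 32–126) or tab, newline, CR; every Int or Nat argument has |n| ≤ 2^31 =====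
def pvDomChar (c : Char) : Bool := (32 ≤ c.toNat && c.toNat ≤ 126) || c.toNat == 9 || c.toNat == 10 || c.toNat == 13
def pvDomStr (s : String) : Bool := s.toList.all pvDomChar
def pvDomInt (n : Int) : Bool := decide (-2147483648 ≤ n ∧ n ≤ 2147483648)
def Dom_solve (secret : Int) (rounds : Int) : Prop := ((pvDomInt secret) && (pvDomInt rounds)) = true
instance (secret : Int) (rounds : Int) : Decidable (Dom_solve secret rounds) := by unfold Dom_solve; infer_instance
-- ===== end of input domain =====

-- B replaces A's streaming first-seen hash map by a sort-based algorithm (materialise all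
-- (window, index, price) entries, sort lexicographically, keep the first of each key block,
-- re-sort the survivors by index); objective: alternative algorithm, same return value.

-- ===== PORT A =====
-- A's loop body, step for step (v1/v2/v3, the in-place xors and mods, the delta append and first-seen insert)
def stepA (st : Int × Int × List Int × PySem.Dict (List Int) Int) :
    Int × Int × List Int × PySem.Dict (List Int) Int :=
  let s0 := st.1
  let prev := st.2.1
  let deltas := st.2.2.1
  let pm := st.2.2.2
  let v1 := s0 * 64
  let sa := PySem.Int.mod (PySem.Int.bxor s0 v1) 16777216
  let v2 := PySem.Int.floordiv sa 32
  let sb := PySem.Int.mod (PySem.Int.bxor sa v2) 16777216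
  let v3 := sb * 2048
  let sc := PySem.Int.mod (PySem.Int.bxor sb v3) 16777216
  let price := PySem.Int.mod sc 10
  let delta := price - prev
  let deltas' := deltas ++ [delta]
  let pm' :=
    if 4 ≤ deltas'.length then
      let key := PySem.List.slice deltas' (some (-4)) none
      if pm.contains key then pm else pm.insert key price
    else pm
  (sc, price, deltas', pm')

def solve (secret : Int) (rounds : Int) : List (List Int × Int) :=
  (((PySem.List.pyRange 0 rounds 1).foldl (fun st _ => stepA st)
      (secret, PySem.Int.mod secret 10, ([] : List Int),
        (PySem.Dict.empty : PySem.Dict (List Int) Int))).2.2.2).items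

-- ===== PORT B =====
-- one PRNG step of Source B's price-building loop
def nextSecret (s : Int) : Int :=
  let s1 := PySem.Int.mod (PySem.Int.bxor s (s * 64)) 16777216
  let s2 := PySem.Int.mod (PySem.Int.bxor s1 (PySem.Int.floordiv s1 32)) 16777216
  PySem.Int.mod (PySem.Int.bxor s2 (s2 * 2048)) 16777216

def stepB (sp : Int × List Int) : Int × List Int :=
  let s := nextSecret sp.1
  (s, sp.2 ++ [PySem.Int.mod s 10])

-- 'if not firsts or firsts[-1][0] != e[0]: firsts.append(e)'
def dedupStep (acc : List (List Int × Int × Int)) (e : List Int × Int × Int) :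
    List (List Int × Int × Int) :=
  match acc.getLast? with
  | none => acc ++ [e]
  | some l => if l.1 ≠ e.1 then acc ++ [e] else acc

def solve_alt (secret : Int) (rounds : Int) : List (List Int × Int) :=
  let prices := ((PySem.List.pyRange 0 rounds 1).foldl (fun sp _ => stepB sp)
      (secret, [PySem.Int.mod secret 10])).2
  let deltas := (prices.zip (PySem.List.slice prices (some 1) none)).map (fun ab => ab.2 - ab.1)
  let entries := (PySem.List.enumerate (PySem.List.slice prices (some 4) none)).map
      (fun ip => (PySem.List.slice deltas (some ip.1) (some (ip.1 + 4)), ip.1, ip.2))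
  let entries1 := PySem.List.sorted2 entries (fun e => e.1) (fun e => e.2.1)
  let firsts := entries1.foldl dedupStep []
  let firsts2 := PySem.List.sorted firsts (fun e => e.2.1)
  (firsts2.foldl (fun d e => d.insert e.1 e.2.2)
      (PySem.Dict.empty : PySem.Dict (List Int) Int)).items

-- ===== PRECONDITION & SPEC =====
def Spec_solve (secret : Int) (rounds : Int) (out : List (List Int × Int)) : Prop := out = solve_alt secret rounds
instance (secret : Int) (rounds : Int) (out : List (List Int × Int)) : Decidable (Spec_solve secret rounds out) := by unfold Spec_solve; infer_instance

-- ===== CLAIM (what is proved, stated in full; the proofs are below) =====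
def Claim_equal_solve : Prop := ∀ (secret : Int) (rounds : Int), Dom_solve secret rounds → Spec_solve secret rounds (solve secret rounds)

-- ===== LEMMAS AND PROOFS =====

-- deltas of a price list (canonical form: drop instead of slice)
def dd (ps : List Int) : List Int := (ps.zip (ps.drop 1)).map (fun ab => ab.2 - ab.1)

-- the consecutive 4-windows of a list
def W4 : List Int → List (List Int)
  | a :: b :: c :: d :: t => [a, b, c, d] :: W4 (b :: c :: d :: t)
  | _ => []

-- canonical entry list: (window key, chronological index, end price)
def Ent (ps : List Int) : List (List Int × Int × Int) :=
  ((W4 (dd ps)).zip (ps.drop 4)).zipIdx.map (fun wz => (wz.1.1, ((wz.2 : Nat) : Int), wz.1.2))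

def projE (e : List Int × Int × Int) : List Int × Int := (e.1, e.2.2)

-- A's first-seen insertion step on (key, price) pairs
def sdStep (d : PySem.Dict (List Int) Int) (p : List Int × Int) : PySem.Dict (List Int) Int :=
  if d.contains p.1 then d else d.insert p.1 p.2

-- first occurrence per key, keeping stream order (pairs / triples)
def FOp : List (List Int × Int) → List (List Int × Int)
  | [] => []
  | e :: t => e :: FOp (t.filter (fun x => decide (x.1 ≠ e.1)))
  termination_by l => l.length
  decreasing_by
    simp only [List.length_unattach, List.length_cons]
    exact Nat.lt_succ_of_le (le_trans (List.length_filter_le _ _) (by simp))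

def FO3 : List (List Int × Int × Int) → List (List Int × Int × Int)
  | [] => []
  | e :: t => e :: FO3 (t.filter (fun x => decide (x.1 ≠ e.1)))
  termination_by l => l.length
  decreasing_by
    simp only [List.length_unattach, List.length_cons]
    exact Nat.lt_succ_of_le (le_trans (List.length_filter_le _ _) (by simp))

-- lexicographic sort key of an entry
def klex (e : List Int × Int × Int) : Lex (List Int × Int) := toLex (e.1, e.2.1)

-- adjacent-key dedup with the previous key as state
def dAdj : Option (List Int) → List (List Int × Int × Int) → List (List Int × Int × Int)
  | _, [] => []
  | none, e :: t => e :: dAdj (some e.1) t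
  | some k, e :: t => if e.1 = k then dAdj (some k) t else e :: dAdj (some e.1) t

-- the PRNG-driven price list after n rounds
def SP (secret : Int) : Nat → Int × List Int
  | 0 => (secret, [PySem.Int.mod secret 10])
  | n+1 =>
    let p := SP secret n
    (nextSecret p.1, p.2 ++ [PySem.Int.mod (nextSecret p.1) 10])

lemma foldl_ignore_iterate {α β : Type} (f : α → α) (l : List β) (init : α) :
    l.foldl (fun a _ => f a) init = f^[l.length] init := by
  induction l generalizing init with
  | nil => rfl
  | cons h t ih => simp [List.foldl_cons, ih, Function.iterate_succ_apply]

lemma SP_iter (secret : Int) (n : Nat) :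
    stepB^[n] (secret, [PySem.Int.mod secret 10]) = SP secret n := by
  induction n with
  | zero => rfl
  | succ n ih => rw [Function.iterate_succ_apply', ih]; rfl

lemma SP_len (secret : Int) (n : Nat) : (SP secret n).2.length = n + 1 := by
  induction n with
  | zero => rfl
  | succ n ih => simp [SP, ih]

lemma dd_cons₂ (a b : Int) (l : List Int) : dd (a :: b :: l) = (b - a) :: dd (b :: l) := by
  simp [dd]

lemma dd_append (ps : List Int) (p : Int) (h : ps ≠ []) :
    dd (ps ++ [p]) = dd ps ++ [p - ps.getLastD 0] := by
  induction ps with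
  | nil => exact absurd rfl h
  | cons a t ih =>
    cases t with
    | nil => simp [dd]
    | cons b t' =>
      have hih := ih (by simp)
      simp only [List.cons_append] at hih ⊢
      rw [dd_cons₂, dd_cons₂, hih]
      simp [List.getLastD]

lemma dd_length (ps : List Int) : (dd ps).length = ps.length - 1 := by
  simp [dd]

lemma W4_length (l : List Int) : (W4 l).length = l.length - 3 := by
  fun_induction W4 l with
  | case1 a b c d t ih => simp [ih]
  | case2 l h =>
    rcases l with _|⟨a,_|⟨b,_|⟨c,_|⟨d,t⟩⟩⟩⟩
    · rfl
    · rfl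
    · rfl
    · rfl
    · exact absurd rfl (h a b c d t)

lemma W4_getElem (l : List Int) (i : Nat) (h : i < (W4 l).length)
    (h3 : i + 3 < l.length) :
    (W4 l)[i] = [l[i]'(by omega), l[i+1]'(by omega), l[i+2]'(by omega), l[i+3]'(by omega)] := by
  induction l using W4.induct generalizing i with
  | case1 a b c d t ih =>
    cases i with
    | zero => rfl
    | succ j =>
      have hh : j < (W4 (b :: c :: d :: t)).length := by
        have : (W4 (a :: b :: c :: d :: t)).length = (W4 (b :: c :: d :: t)).length + 1 := by
          simp [W4]
        omega
      have := ih j hh (by simp at h3 ⊢; omega)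
      simpa using this
  | case2 l hp =>
    exfalso
    have : l.length ≤ 3 := by
      rcases l with _|⟨a,_|⟨b,_|⟨c,_|⟨d,t⟩⟩⟩⟩
      · simp
      · simp
      · simp
      · simp
      · exact absurd rfl (hp a b c d t)
    omega

lemma W4_append (u : List Int) (x a b c : Int) (m : Nat) (h : u.length = m + 3)
    (hd : u.drop m = [a, b, c]) :
    W4 (u ++ [x]) = W4 u ++ [[a, b, c, x]] := by
  induction m generalizing u with
  | zero =>
    have : u = [a,b,c] := by simpa using hd
    subst this; rfl
  | succ n ih =>
    rcases u with _|⟨u0,_|⟨p,_|⟨q,_|⟨r,s⟩⟩⟩⟩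
    · simp at h
    · simp at h
    · simp at h
    · simp at h
    · have h' : (p :: q :: r :: s).length = n + 3 := by simp at h ⊢; omega
      have hd' : (p :: q :: r :: s).drop n = [a, b, c] := by simpa [List.drop_succ_cons] using hd
      have IH := ih (p :: q :: r :: s) h' hd'
      show W4 (u0 :: p :: q :: r :: (s ++ [x])) = _
      rw [W4]
      have e3 : p :: q :: r :: (s ++ [x]) = (p :: q :: r :: s) ++ [x] := by simp
      rw [e3, IH]; rfl

-- A's accumulated dict after processing the pair stream
def pmA (ps : List Int) : PySem.Dict (List Int) Int :=
  (((W4 (dd ps)).zip (ps.drop 4))).foldl sdStep PySem.Dict.empty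

lemma pmA_small (qs : List Int) (hq : qs.length ≤ 4) : pmA qs = PySem.Dict.empty := by
  unfold pmA
  have h1 : W4 (dd qs) = [] :=
    List.eq_nil_of_length_eq_zero (by rw [W4_length, dd_length]; omega)
  simp [h1]

lemma stepA_eq (s prev : Int) (ds : List Int) (pm : PySem.Dict (List Int) Int) :
    stepA (s, prev, ds, pm) =
      (nextSecret s, PySem.Int.mod (nextSecret s) 10,
        ds ++ [PySem.Int.mod (nextSecret s) 10 - prev],
        if 4 ≤ (ds ++ [PySem.Int.mod (nextSecret s) 10 - prev]).length then
          (if pm.contains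
              (PySem.List.slice (ds ++ [PySem.Int.mod (nextSecret s) 10 - prev]) (some (-4)) none)
            then pm
            else pm.insert
              (PySem.List.slice (ds ++ [PySem.Int.mod (nextSecret s) 10 - prev]) (some (-4)) none)
              (PySem.Int.mod (nextSecret s) 10))
        else pm) := rfl

lemma mainA (secret : Int) (n : Nat) :
    stepA^[n] (secret, PySem.Int.mod secret 10, ([] : List Int),
        (PySem.Dict.empty : PySem.Dict (List Int) Int))
      = ((SP secret n).1, (SP secret n).2.getLastD 0, dd (SP secret n).2, pmA (SP secret n).2) := by
  induction n with
  | zero =>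
    simp [SP, dd, pmA_small]
  | succ n ih =>
    rw [Function.iterate_succ_apply', ih]
    set s := (SP secret n).1 with hs
    set ps := (SP secret n).2 with hps'
    have hlen : ps.length = n + 1 := SP_len secret n
    have hps : ps ≠ [] := by intro h0; rw [h0] at hlen; simp at hlen
    set price := PySem.Int.mod (nextSecret s) 10 with hprice
    have hSP : SP secret (n+1) = (nextSecret s, ps ++ [price]) := rfl
    rw [stepA_eq, hSP]
    have hdd : dd (ps ++ [price]) = dd ps ++ [price - ps.getLastD 0] := dd_append ps price hps
    have hddlen : (dd ps).length = n := by rw [dd_length, hlen]; omega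
    have hlen1 : (dd ps ++ [price - ps.getLastD 0]).length = n + 1 := by simp [hddlen]
    simp only [Prod.mk.injEq]
    refine ⟨trivial, ?_, ?_, ?_⟩
    · exact (List.getLastD_concat).symm
    · exact hdd.symm
    · by_cases h3 : 3 ≤ n
      · rw [if_pos (by rw [hlen1]; omega)]
        obtain ⟨a, b, c, habc⟩ : ∃ a b c, (dd ps).drop (n - 3) = [a, b, c] :=
          List.length_eq_three.mp (by rw [List.length_drop, hddlen]; omega)
        have hkey : PySem.List.slice (dd ps ++ [price - ps.getLastD 0]) (some (-4)) none
            = [a, b, c, price - ps.getLastD 0] := by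
          rw [PySem.List.slice_from_neg_ofNat _ 4 (by omega), hlen1]
          have h14 : n + 1 - 4 = n - 3 := by omega
          rw [h14, List.drop_append_of_le_length (by rw [hddlen]; omega), habc]
          rfl
        have hW : W4 (dd ps ++ [price - ps.getLastD 0])
            = W4 (dd ps) ++ [[a, b, c, price - ps.getLastD 0]] :=
          W4_append (dd ps) _ a b c (n - 3) (by omega) habc
        have hzip : (W4 (dd (ps ++ [price]))).zip ((ps ++ [price]).drop 4)
            = (W4 (dd ps)).zip (ps.drop 4)
              ++ [([a, b, c, price - ps.getLastD 0], price)] := by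
          rw [hdd, hW, List.drop_append_of_le_length (by omega),
            List.zip_append (by rw [W4_length, hddlen, List.length_drop, hlen]; omega)]
          rfl
        have hpm : pmA (ps ++ [price])
            = sdStep (pmA ps) ([a, b, c, price - ps.getLastD 0], price) := by
          unfold pmA
          rw [hzip, List.foldl_append]
          rfl
        rw [hpm, hkey]
        rfl
      · rw [if_neg (by rw [hlen1]; omega)]
        rw [pmA_small ps (by omega), pmA_small (ps ++ [price]) (by simp [hlen]; omega)]

-- items of the first-seen fold = first-occurrence dedup of the stream
lemma items_foldl_sdStep (L : List (List Int × Int)) (d : PySem.Dict (List Int) Int)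
    (hd : d.keys.Nodup) :
    (L.foldl sdStep d).items = d.items ++ FOp (L.filter (fun p => !d.contains p.1)) := by
  induction L generalizing d with
  | nil => simp [FOp]
  | cons p t ih =>
    rw [List.foldl_cons]
    by_cases hc : d.contains p.1
    · have : sdStep d p = d := by simp [sdStep, hc]
      rw [this, ih d hd, List.filter_cons_of_neg (by simp [hc])]
    · have hstep : sdStep d p = d.insert p.1 p.2 := by simp [sdStep, hc]
      rw [hstep, List.filter_cons_of_pos (by simp [hc])]
      have hnd' : (d.insert p.1 p.2).keys.Nodup := PySem.Dict.nodup_keys_insert d p.1 p.2 hd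
      rw [ih _ hnd', PySem.Dict.items_insert_of_not_contains d p.2 (by simpa using hc)]
      rw [FOp]
      have hfil : t.filter (fun q => !(d.insert p.1 p.2).contains q.1)
          = (t.filter (fun q => !d.contains q.1)).filter (fun x => decide (x.1 ≠ p.1)) := by
        rw [List.filter_filter]
        apply List.filter_congr
        intro q _
        rw [PySem.Dict.contains_insert]
        cases hq : d.contains q.1 <;> by_cases hqe : q.1 = p.1 <;> simp [hqe]
      rw [hfil]
      simp

lemma FOp_map_projE (l : List (List Int × Int × Int)) :
    FOp (l.map projE) = (FO3 l).map projE := by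
  induction hn : l.length using Nat.strong_induction_on generalizing l with
  | _ n ih =>
    match l with
    | [] => simp [FOp, FO3]
    | e :: t =>
      rw [FO3, List.map_cons, FOp]
      have hfm : (t.map projE).filter (fun x => decide (x.1 ≠ (projE e).1))
          = (t.filter (fun x => decide (x.1 ≠ e.1))).map projE := by
        rw [List.filter_map]
        rfl
      rw [hfm, ih _ (by subst hn; exact Nat.lt_succ_of_le (List.length_filter_le _ _)) _ rfl,
        List.map_cons]

lemma FO3_sublist (l : List (List Int × Int × Int)) : (FO3 l).Sublist l := by
  induction hn : l.length using Nat.strong_induction_on generalizing l with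
  | _ n ih =>
    match l with
    | [] => simp [FO3]
    | e :: t =>
      rw [FO3]
      exact List.Sublist.cons₂ e
        ((ih _ (by subst hn; exact Nat.lt_succ_of_le (List.length_filter_le _ _)) _ rfl).trans
          List.filter_sublist)

lemma FO3_keys_nodup (l : List (List Int × Int × Int)) :
    ((FO3 l).map (fun e => e.1)).Nodup := by
  induction hn : l.length using Nat.strong_induction_on generalizing l with
  | _ n ih =>
    match l with
    | [] => simp [FO3]
    | e :: t =>
      rw [FO3, List.map_cons, List.nodup_cons]
      refine ⟨?_, ih _ (by subst hn; exact Nat.lt_succ_of_le (List.length_filter_le _ _)) _ rfl⟩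
      intro hmem
      obtain ⟨y, hy, hk⟩ := List.mem_map.mp hmem
      have h1 := (FO3_sublist _).subset hy
      have := List.of_mem_filter h1
      simp [hk] at this

lemma mem_FO3 (l : List (List Int × Int × Int))
    (h : l.Pairwise (fun a b => a.2.1 < b.2.1)) (x : List Int × Int × Int) :
    x ∈ FO3 l ↔ x ∈ l ∧ ∀ y ∈ l, y.1 = x.1 → x.2.1 ≤ y.2.1 := by
  induction hn : l.length using Nat.strong_induction_on generalizing l with
  | _ n ih =>
    match l with
    | [] => simp [FO3]
    | e :: t =>
      rw [FO3]
      have hfl : (t.filter (fun x => decide (x.1 ≠ e.1))).length < n := by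
        subst hn
        exact Nat.lt_succ_of_le (List.length_filter_le _ _)
      have hfp : (t.filter (fun x => decide (x.1 ≠ e.1))).Pairwise (fun a b => a.2.1 < b.2.1) :=
        List.Pairwise.sublist List.filter_sublist (List.Pairwise.of_cons h)
      have IH := ih _ hfl (t.filter (fun x => decide (x.1 ≠ e.1))) hfp rfl
      constructor
      · intro hmem
        rcases List.mem_cons.mp hmem with rfl | hx
        · refine ⟨List.mem_cons_self, ?_⟩
          intro y hy hk
          rcases List.mem_cons.mp hy with rfl | hyt
          · exact le_refl _
          · exact le_of_lt ((List.pairwise_cons.mp h).1 y hyt)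
        · obtain ⟨hx1, hx2⟩ := IH.mp hx
          have hxne : x.1 ≠ e.1 := by simpa using (List.of_mem_filter hx1)
          have hxt : x ∈ t := List.mem_of_mem_filter hx1
          refine ⟨List.mem_cons_of_mem e hxt, ?_⟩
          intro y hy hk
          rcases List.mem_cons.mp hy with rfl | hyt
          · exact absurd hk (fun hh => hxne hh.symm)
          · by_cases hyk : y.1 ≠ e.1
            · exact hx2 y (List.mem_filter.mpr ⟨hyt, by simpa using hyk⟩) hk
            · have hyk' := not_not.mp hyk
              exact absurd (hyk'.symm.trans hk).symm hxne
      · rintro ⟨hx, hmin⟩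
        rcases List.mem_cons.mp hx with rfl | hxt
        · exact List.mem_cons_self
        · have hxe : x.1 ≠ e.1 := by
            intro hk
            have h1 : e.2.1 < x.2.1 := (List.pairwise_cons.mp h).1 x hxt
            have h2 : x.2.1 ≤ e.2.1 := hmin e List.mem_cons_self hk.symm
            omega
          apply List.mem_cons_of_mem
          apply IH.mpr
          refine ⟨List.mem_filter.mpr ⟨hxt, by simpa using hxe⟩, ?_⟩
          intro y hy hk
          exact hmin y (List.mem_cons_of_mem e (List.mem_of_mem_filter hy)) hk

lemma dAdj_sublist (k : Option (List Int)) (l : List (List Int × Int × Int)) :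
    (dAdj k l).Sublist l := by
  induction l generalizing k with
  | nil => cases k <;> exact List.Sublist.refl _
  | cons e t ih =>
    cases k with
    | none => exact List.Sublist.cons₂ e (ih _)
    | some kk =>
      rw [dAdj]
      split_ifs with h
      · exact List.Sublist.cons e (ih _)
      · exact List.Sublist.cons₂ e (ih _)

lemma klex_fst_le_of_lt {a b : List Int × Int × Int} (h : klex a < klex b) : a.1 ≤ b.1 := by
  rcases Prod.Lex.lt_iff.mp h with hlt | ⟨heq, _⟩
  · exact le_of_lt hlt
  · exact le_of_eq heq

lemma mem_dAdj_some (l : List (List Int × Int × Int)) (e : List Int × Int × Int)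
    (h : (e :: l).Pairwise (fun a b => klex a < klex b)) (x : List Int × Int × Int) :
    x ∈ dAdj (some e.1) l ↔ x ∈ l ∧ x.1 ≠ e.1 ∧ ∀ y ∈ l, y.1 = x.1 → klex x ≤ klex y := by
  induction l generalizing e with
  | nil => simp [dAdj]
  | cons f t ih =>
    have hef : klex e < klex f := (List.pairwise_cons.mp h).1 f List.mem_cons_self
    have hft : (f :: t).Pairwise (fun a b => klex a < klex b) := (List.pairwise_cons.mp h).2
    have het : (e :: t).Pairwise (fun a b => klex a < klex b) := by
      rw [List.pairwise_cons]
      exact ⟨fun y hy => (List.pairwise_cons.mp h).1 y (List.mem_cons_of_mem f hy),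
        (List.pairwise_cons.mp hft).2⟩
    rw [dAdj]
    by_cases hfe : f.1 = e.1
    · rw [if_pos hfe]
      rw [ih e het]
      constructor
      · rintro ⟨hxt, hxe, hmin⟩
        refine ⟨List.mem_cons_of_mem f hxt, hxe, ?_⟩
        intro y hy hk
        rcases List.mem_cons.mp hy with rfl | hyt
        · exact absurd (hk.symm.trans hfe) hxe
        · exact hmin y hyt hk
      · rintro ⟨hx, hxe, hmin⟩
        rcases List.mem_cons.mp hx with rfl | hxt
        · exact absurd hfe hxe
        · exact ⟨hxt, hxe, fun y hy hk => hmin y (List.mem_cons_of_mem f hy) hk⟩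
    · rw [if_neg hfe]
      constructor
      · intro hmem
        rcases List.mem_cons.mp hmem with rfl | hx
        · refine ⟨List.mem_cons_self, hfe, ?_⟩
          intro y hy hk
          rcases List.mem_cons.mp hy with rfl | hyt
          · exact le_refl _
          · exact le_of_lt ((List.pairwise_cons.mp hft).1 y hyt)
        · obtain ⟨hxt, hxf, hmin⟩ := (ih f hft).mp hx
          have hxe : x.1 ≠ e.1 := by
            intro hxe1
            have h1 : e.1 ≤ f.1 := klex_fst_le_of_lt hef
            have h2 : f.1 ≤ x.1 :=
              klex_fst_le_of_lt ((List.pairwise_cons.mp hft).1 x hxt)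
            rw [hxe1] at h2
            exact hfe (le_antisymm h2 h1)
          refine ⟨List.mem_cons_of_mem f hxt, hxe, ?_⟩
          intro y hy hk
          rcases List.mem_cons.mp hy with rfl | hyt
          · exact absurd hk (fun hh => hxf hh.symm)
          · exact hmin y hyt hk
      · rintro ⟨hx, hxe, hmin⟩
        rcases List.mem_cons.mp hx with rfl | hxt
        · exact List.mem_cons_self
        · have hxf : x.1 ≠ f.1 := by
            intro hk
            have h1 : klex f < klex x := (List.pairwise_cons.mp hft).1 x hxt
            have h2 : klex x ≤ klex f := hmin f List.mem_cons_self hk.symm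
            exact absurd h1 (not_lt.mpr h2)
          exact List.mem_cons_of_mem f ((ih f hft).mpr
            ⟨hxt, hxf, fun y hy hk => hmin y (List.mem_cons_of_mem f hy) hk⟩)

lemma mem_dAdj_none (l : List (List Int × Int × Int))
    (h : l.Pairwise (fun a b => klex a < klex b)) (x : List Int × Int × Int) :
    x ∈ dAdj none l ↔ x ∈ l ∧ ∀ y ∈ l, y.1 = x.1 → klex x ≤ klex y := by
  cases l with
  | nil => simp [dAdj]
  | cons e t =>
    rw [dAdj]
    constructor
    · intro hmem
      rcases List.mem_cons.mp hmem with rfl | hx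
      · refine ⟨List.mem_cons_self, ?_⟩
        intro y hy hk
        rcases List.mem_cons.mp hy with rfl | hyt
        · exact le_refl _
        · exact le_of_lt ((List.pairwise_cons.mp h).1 y hyt)
      · obtain ⟨hxt, hxe, hmin⟩ := (mem_dAdj_some t e h x).mp hx
        refine ⟨List.mem_cons_of_mem e hxt, ?_⟩
        intro y hy hk
        rcases List.mem_cons.mp hy with rfl | hyt
        · exact absurd hk (fun hh => hxe hh.symm)
        · exact hmin y hyt hk
    · rintro ⟨hx, hmin⟩
      rcases List.mem_cons.mp hx with rfl | hxt
      · exact List.mem_cons_self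
      · have hxe : x.1 ≠ e.1 := by
          intro hk
          have h1 : klex e < klex x := (List.pairwise_cons.mp h).1 x hxt
          have h2 : klex x ≤ klex e := hmin e List.mem_cons_self hk.symm
          exact absurd h1 (not_lt.mpr h2)
        exact List.mem_cons_of_mem e ((mem_dAdj_some t e h x).mpr
          ⟨hxt, hxe, fun y hy hk => hmin y (List.mem_cons_of_mem e hy) hk⟩)

lemma foldl_dedupStep (t : List (List Int × Int × Int)) (acc : List (List Int × Int × Int)) :
    t.foldl dedupStep acc = acc ++ dAdj (acc.getLast?.map (fun e => e.1)) t := by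
  induction t generalizing acc with
  | nil => cases h : acc.getLast? <;> simp [dAdj]
  | cons e t ih =>
    rw [List.foldl_cons]
    cases hl : acc.getLast? with
    | none =>
      have hacc : acc = [] := List.getLast?_eq_none_iff.mp hl
      subst hacc
      rw [show dedupStep [] e = [] ++ [e] from rfl]
      rw [ih]
      simp [dAdj]
    | some lst =>
      rw [show dedupStep acc e = if lst.1 ≠ e.1 then acc ++ [e] else acc from by
        simp [dedupStep, hl]]
      by_cases hne : lst.1 ≠ e.1
      · rw [if_pos hne, ih]
        have : (acc ++ [e]).getLast? = some e := by simp
        rw [this]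
        have : dAdj (some lst.1) (e :: t) = e :: dAdj (some e.1) t := by
          rw [dAdj, if_neg (fun hh => hne hh.symm)]
        simp [this]
      · rw [if_neg hne, ih, hl]
        have he : e.1 = lst.1 := (not_not.mp hne).symm
        have : dAdj (some lst.1) (e :: t) = dAdj (some lst.1) t := by
          rw [dAdj, if_pos he]
        simp [this]

lemma enum_length {α : Type} (xs : List α) (s : Int) :
    (PySem.List.enumerate xs s).length = xs.length := by
  induction xs generalizing s with
  | nil => rfl
  | cons x t ih => rw [PySem.List.enumerate_cons]; simp [ih]

lemma enum_getElem {α : Type} (xs : List α) (s : Int) (i : Nat)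
    (h : i < (PySem.List.enumerate xs s).length) (h' : i < xs.length) :
    (PySem.List.enumerate xs s)[i] = (s + i, xs[i]) := by
  induction xs generalizing s i with
  | nil => simp at h'
  | cons x t ih =>
    simp only [PySem.List.enumerate_cons]
    cases i with
    | zero => simp
    | succ j =>
      have := ih (s + 1) j (by simpa using h) (by simpa using h')
      simp only [List.getElem_cons_succ, this, Prod.mk.injEq]
      refine ⟨by push_cast; ring, by simp⟩

lemma take4_drop (l : List Int) (i : Nat) (h3 : i + 3 < l.length) :
    (l.drop i).take 4
      = [l[i]'(by omega), l[i+1]'(by omega), l[i+2]'(by omega), l[i+3]'(by omega)] := by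
  rw [List.drop_eq_getElem_cons (show i < l.length by omega),
    List.drop_eq_getElem_cons (show i + 1 < l.length by omega),
    List.drop_eq_getElem_cons (show i + 2 < l.length by omega),
    List.drop_eq_getElem_cons (show i + 3 < l.length by omega)]
  rfl

lemma entriesB_eq (ps : List Int) :
    (PySem.List.enumerate (PySem.List.slice ps (some 4) none)).map
      (fun ip => (PySem.List.slice (dd ps) (some ip.1) (some (ip.1 + 4)), ip.1, ip.2)) = Ent ps := by
  have h4 : PySem.List.slice ps (some 4) none = ps.drop 4 := by
    simpa using PySem.List.slice_from_natCast ps 4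
  rw [h4]
  apply List.ext_getElem
  · simp [Ent, W4_length, dd_length]
    omega
  · intro i h1 h2
    have hi : i < (ps.drop 4).length := by
      simpa [enum_length] using h1
    have hW : i < (W4 (dd ps)).length := by
      rw [W4_length, dd_length]
      simp at hi
      omega
    have hdd3 : i + 3 < (dd ps).length := by
      rw [dd_length]
      simp at hi
      omega
    rw [List.getElem_map, enum_getElem _ _ _ (by simpa [enum_length] using hi) hi]
    have hz : i < (((W4 (dd ps)).zip (ps.drop 4)).zipIdx).length := by
      simpa [List.length_zipIdx, List.length_zip] using
        (by omega : i < min (W4 (dd ps)).length (ps.drop 4).length)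
    simp only [Ent, List.getElem_map, List.getElem_zipIdx, List.getElem_zip]
    have hc : (0:Int) + (i:Int) = ((i:Nat):Int) := by omega
    have hc2 : ((i:Int)) + 4 = (((i+4:Nat)):Int) := by push_cast; ring
    rw [hc, hc2, PySem.List.slice_natCast, show i + 4 - i = 4 from by omega,
      take4_drop (dd ps) i hdd3, W4_getElem (dd ps) i hW hdd3]
    simp

lemma sorted2_eq_sorted_klex (l : List (List Int × Int × Int)) :
    PySem.List.sorted2 l (fun e => e.1) (fun e => e.2.1) = PySem.List.sorted l klex := by
  rw [PySem.List.sorted_eq_foldl_insertBy]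
  show l.foldl (fun acc x => PySem.List.insertBy _ x acc) [] = _
  have hfun : (fun a b : List Int × Int × Int =>
        (decide (a.1 < b.1) || (!decide (b.1 < a.1) && decide (a.2.1 < b.2.1))))
      = (fun a b : List Int × Int × Int => decide (klex a < klex b)) := by
    funext a b
    rcases lt_trichotomy a.1 b.1 with hlt | heq | hgt
    · simp [klex, Prod.Lex.lt_iff, hlt, not_lt.mpr (le_of_lt hlt)]
    · simp [klex, Prod.Lex.lt_iff, heq]
    · have hne : a.1 ≠ b.1 := ne_of_gt hgt
      simp only [klex, Prod.Lex.lt_iff]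
      have h1 : ¬ (a.1 < b.1) := not_lt_of_gt hgt
      simp [h1, hne, hgt]
  exact congrArg (fun f => l.foldl (fun acc x => PySem.List.insertBy f x acc) []) hfun

lemma Ent_pairwise_idx (ps : List Int) : (Ent ps).Pairwise (fun a b => a.2.1 < b.2.1) := by
  rw [List.pairwise_iff_getElem]
  intro i j hi hj hij
  have hiz : i < (((W4 (dd ps)).zip (ps.drop 4)).zipIdx).length := by simpa [Ent] using hi
  have hjz : j < (((W4 (dd ps)).zip (ps.drop 4)).zipIdx).length := by simpa [Ent] using hj
  simp only [Ent, List.getElem_map, List.getElem_zipIdx]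
  simpa using hij

lemma Ent_map_projE (ps : List Int) :
    (Ent ps).map projE = (W4 (dd ps)).zip (ps.drop 4) := by
  simp only [Ent, List.map_map]
  have : (projE ∘ fun wz : (List Int × Int) × Nat => (wz.1.1, ((wz.2 : Nat) : Int), wz.1.2))
      = Prod.fst := by
    funext wz
    rfl
  rw [this]
  exact List.zipIdx_map_fst 0 _

lemma klex_le_iff_of_eq_fst {x y : List Int × Int × Int} (h : y.1 = x.1) :
    klex x ≤ klex y ↔ x.2.1 ≤ y.2.1 := by
  rw [show klex x ≤ klex y ↔ x.1 < y.1 ∨ (x.1 = y.1 ∧ x.2.1 ≤ y.2.1) from Prod.Lex.le_iff]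
  rw [h]
  simp

lemma klex_eq_idx {a b : List Int × Int × Int} (h : klex a = klex b) : a.2.1 = b.2.1 := by
  have := congrArg (fun z => (ofLex z).2) h
  simpa [klex] using this

lemma B_pipeline (ps : List Int) :
    PySem.List.sorted ((PySem.List.sorted (Ent ps) klex).foldl dedupStep [])
      (fun e => e.2.1) = FO3 (Ent ps) := by
  set E := Ent ps with hE
  set S := PySem.List.sorted E klex with hS
  have hperm : S.Perm E := PySem.List.sorted_perm E klex false
  have hidx : E.Pairwise (fun a b => a.2.1 < b.2.1) := Ent_pairwise_idx ps
  have hne : E.Pairwise (fun a b => klex a ≠ klex b) :=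
    hidx.imp (fun h hk => absurd (klex_eq_idx hk ▸ h) (lt_irrefl _))
  have hle : S.Pairwise (fun a b => klex a ≤ klex b) := PySem.List.sorted_pairwise E klex
  have hsymm : Symmetric (fun a b : List Int × Int × Int => klex a ≠ klex b) :=
    fun _ _ h => h.symm
  have hneS : S.Pairwise (fun a b => klex a ≠ klex b) :=
    (List.Perm.pairwise_iff (fun {a b} h => hsymm h) hperm).mpr hne
  have hlt : S.Pairwise (fun a b => klex a < klex b) :=
    (hle.and hneS).imp (fun h => lt_of_le_of_ne h.1 h.2)
  have hd : S.foldl dedupStep [] = dAdj none S := by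
    rw [foldl_dedupStep]
    rfl
  rw [hd]
  have hSnodup : S.Nodup := hlt.imp (fun h heq => absurd (heq ▸ h) (lt_irrefl _))
  have hdnodup : (dAdj none S).Nodup := (dAdj_sublist none S).nodup hSnodup
  have hEnodup : E.Nodup := hidx.imp (fun h heq => by
    rw [heq] at h
    exact absurd h (lt_irrefl _))
  have hFnodup : (FO3 E).Nodup := (FO3_sublist E).nodup hEnodup
  have hmemiff : ∀ x, x ∈ FO3 E ↔ x ∈ dAdj none S := by
    intro x
    rw [mem_FO3 E hidx x, mem_dAdj_none S hlt x]
    constructor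
    · rintro ⟨hx, hmin⟩
      refine ⟨hperm.mem_iff.mpr hx, ?_⟩
      intro y hy hk
      exact (klex_le_iff_of_eq_fst hk).mpr (hmin y (hperm.mem_iff.mp hy) hk)
    · rintro ⟨hx, hmin⟩
      refine ⟨hperm.mem_iff.mp hx, ?_⟩
      intro y hy hk
      exact (klex_le_iff_of_eq_fst hk).mp (hmin y (hperm.mem_iff.mpr hy) hk)
  have hpermFD : (FO3 E).Perm (dAdj none S) :=
    (List.perm_ext_iff_of_nodup hFnodup hdnodup).mpr hmemiff
  have hFidx : (FO3 E).Pairwise (fun a b => a.2.1 < b.2.1) :=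
    List.Pairwise.sublist (FO3_sublist E) hidx
  exact PySem.List.sorted_eq_of_perm_of_pairwise_lt _ _ _ hpermFD hFidx

lemma deltas_eq (ps : List Int) :
    (ps.zip (PySem.List.slice ps (some 1) none)).map (fun ab => ab.2 - ab.1) = dd ps := by
  rw [PySem.List.slice_from_one]
  simp [dd, List.drop_one]

lemma solve_alt_eq (secret : Int) (rounds : Int) :
    solve_alt secret rounds
      = ((FO3 (Ent ((SP secret (PySem.List.pyRange 0 rounds 1).length).2))).map projE) := by
  unfold solve_alt
  dsimp only
  rw [foldl_ignore_iterate stepB, SP_iter]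
  set ps := (SP secret (PySem.List.pyRange 0 rounds 1).length).2 with hps
  rw [deltas_eq, entriesB_eq, sorted2_eq_sorted_klex, B_pipeline]
  rw [PySem.Dict.items_foldl_insert_fresh (FO3 (Ent ps)) (fun e => e.1) (fun e => e.2.2)
    PySem.Dict.empty (fun a _ => PySem.Dict.contains_empty _) (FO3_keys_nodup (Ent ps))]
  rw [show (PySem.Dict.empty : PySem.Dict (List Int) Int).items = [] from rfl]
  rfl

lemma solve_eq (secret : Int) (rounds : Int) :
    solve secret rounds
      = FOp ((Ent ((SP secret (PySem.List.pyRange 0 rounds 1).length).2)).map projE) := by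
  unfold solve
  rw [foldl_ignore_iterate stepA, mainA]
  set ps := (SP secret (PySem.List.pyRange 0 rounds 1).length).2 with hps
  show (pmA ps).items = _
  unfold pmA
  rw [items_foldl_sdStep _ _ PySem.Dict.nodup_keys_empty]
  rw [Ent_map_projE]
  rw [show (PySem.Dict.empty : PySem.Dict (List Int) Int).items = [] from rfl]
  simp [PySem.Dict.contains_empty]

-- ===== VERDICT (by name: the statement is the Claim_ definition above) =====
theorem solve_spec : Claim_equal_solve := by
  intro secret rounds _
  unfold Spec_solve
  rw [solve_eq, solve_alt_eq, FOp_map_projE]
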